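-- pv_equiv track=rewrite | github.com/Adelin010/PythonProj | Erfordnis4.py | erford4
-- ===== SOURCE A (Python) =====
-- def XOR(dec1: int, dec2: int)-> int:
--     binary1, binary2 = [], []
--
--     #Binary interpretation of the numbers
--     while dec1 != 0:
--         binary1.append(dec1 % 2 )
--         dec1 //= 2
--
--     while dec2 != 0:
--         binary2.append(dec2 % 2)
--         dec2 //= 2
--
--     #Equalizing the binary vectors
--     len1 = len(binary1)
--     len2 = len(binary2)
--     if len1 > len2 :
--         # Must be complete(fill it with 0's)
--         for idx in range(len2, len1):
--             binary2.append(0)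
--         len2 = len1
--
--     elif len1 < len2:
--         for idx in range(len1, len2):
--             binary1.append(0)
--         len1 = len2
--
--     #to save memory the result will remain in binary2
--     for idx in range(0, len1):
--         if binary2[idx] == binary1[idx]:
--             binary2[idx] = 0
--         else :
--             binary2[idx] = 1
--
--     #Reconverting in base 10
--     rez: int = 0
--     for idx in range(0, len1):
--         rez = rez + ((2 ** idx)*binary2[idx])
--
--     return rez
--
-- def erford4(arr: list[int], symbol: str)-> list[int]:
--     rez = [arr[0]]
--     match symbol:
--         case "+":
--             rez[len(rez):] = [arr[idx] + arr[0] for idx in range(1, len(arr))]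
--         case "*":
--             rez[len(rez):] = [arr[idx] * arr[0] for idx in range(1, len(arr))]
--         case "^":
--             rez[len(rez):] = [arr[idx] ^ arr[0] for idx in range(1, len(arr))]
--         case "XOR":
--             rez[len(rez):] = [XOR(arr[idx], arr[0]) for idx in range(1, len(arr))]
--         case _:
--             raise TypeError("Symbol not accepted, a wrong symbol has been entered")
--     return rez
-- ===== SOURCE B (Python) =====
-- def _xor(a, b):
--     # single streaming pass: no bit lists, no padding
--     res = 0
--     p = 1
--     while a or b:
--         if a % 2 != b % 2:
--             res += p
--         a //= 2
--         b //= 2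
--         p *= 2
--     return res
--
--
-- def erford4(arr, symbol):
--     ops = {
--         "+": (lambda x, h: x + h),
--         "*": (lambda x, h: x * h),
--         "^": (lambda x, h: x ^ h),
--         "XOR": _xor,
--     }
--     if symbol not in ops:
--         raise TypeError("Symbol not accepted, a wrong symbol has been entered")
--     h = arr[0]
--     f = ops[symbol]
--     return [h] + [f(x, h) for x in arr[1:]]
-- ===== Notes on version B (the rewrite author's own statement) =====
-- stated objective: simpler
-- what changed: The XOR helper's four passes (build two bit-lists, pad the shorter, compare in place, reconvert) are replaced by one streaming loop keeping res and a running power of two, and the match-statement dispatch is replaced by a dictionary of operator lambdas applied over arr[1:].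
import Mathlib
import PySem

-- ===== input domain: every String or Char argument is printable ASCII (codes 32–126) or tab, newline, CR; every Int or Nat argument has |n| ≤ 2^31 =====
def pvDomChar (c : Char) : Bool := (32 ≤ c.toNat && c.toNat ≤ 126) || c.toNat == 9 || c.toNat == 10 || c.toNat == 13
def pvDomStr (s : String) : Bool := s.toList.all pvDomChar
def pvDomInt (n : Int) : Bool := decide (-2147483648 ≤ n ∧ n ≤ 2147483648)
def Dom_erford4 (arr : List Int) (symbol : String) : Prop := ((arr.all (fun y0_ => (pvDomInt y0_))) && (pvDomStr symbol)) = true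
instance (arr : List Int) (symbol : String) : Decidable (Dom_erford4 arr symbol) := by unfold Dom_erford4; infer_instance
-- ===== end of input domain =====

-- B replaces the XOR helper's build/pad/compare/reconvert bit-lists with one streaming loop
-- and the match dispatch with a dictionary of operator lambdas (objective: simpler).
-- Pre_ excludes the empty list (A raises IndexError on arr[0]), unknown symbols (A raises
-- TypeError), and "XOR" applied to a negative element (A's XOR helper loops forever there).


-- ===== PORT A =====
-- A's first two while-loops: collect d % 2, d //= 2 while d ≠ 0.  Fuel 64 is exact on the
-- domain (|n| ≤ 2^31 and Pre_ gives 0 ≤ d); on negative d the Python loop never terminates.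
def bitsA : Nat → Int → List Int
  | 0, _ => []
  | f + 1, d => if d = 0 then [] else PySem.Int.mod d 2 :: bitsA f (PySem.Int.floordiv d 2)

-- A's equalizing step: append zeros to the shorter list up to length n
def padTo (l : List Int) (n : Nat) : List Int := l ++ List.replicate (n - l.length) 0

-- A's compare loop (result written into binary2): binary2[idx] := 0 if equal else 1
def cmpBits (b1 b2 : List Int) : List Int :=
  List.zipWith (fun y x => if y = x then 0 else 1) b2 b1

-- A's reconversion loop: rez += 2 ** idx * binary2[idx]
def reconA : List Int → Nat → Int
  | [], _ => 0
  | x :: xs, i => 2 ^ i * x + reconA xs (i + 1)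

def XOR_A (dec1 dec2 : Int) : Int :=
  let b1 := bitsA 64 dec1
  let b2 := bitsA 64 dec2
  let n := max b1.length b2.length
  reconA (cmpBits (padTo b1 n) (padTo b2 n)) 0

def erford4 (arr : List Int) (symbol : String) : List Int :=
  match arr with
  | [] => []                      -- Python: IndexError on arr[0]; excluded by Pre_
  | a0 :: rest =>
    if symbol = "+" then a0 :: rest.map (fun x => x + a0)
    else if symbol = "*" then a0 :: rest.map (fun x => x * a0)
    else if symbol = "^" then a0 :: rest.map (fun x => PySem.Int.bxor x a0)
    else if symbol = "XOR" then a0 :: rest.map (fun x => XOR_A x a0)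
    else []                       -- Python: TypeError; excluded by Pre_

-- ===== PORT B =====
-- B's streaming loop: while a or b: res += p if bits differ; a //= 2; b //= 2; p *= 2.
-- Fuel 64 is exact on the domain (Pre_ gives 0 ≤ a, b ≤ 2^31); Python diverges on negatives.
def xorB : Nat → Int → Int → Int → Int → Int
  | 0, _, _, _, res => res
  | f + 1, a, b, p, res =>
    if a = 0 ∧ b = 0 then res
    else xorB f (PySem.Int.floordiv a 2) (PySem.Int.floordiv b 2) (p * 2)
           (if PySem.Int.mod a 2 ≠ PySem.Int.mod b 2 then res + p else res)

def XOR_B (a b : Int) : Int := xorB 64 a b 1 0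

-- B's ops dictionary, as a dispatch helper
def opB (symbol : String) (x h : Int) : Int :=
  if symbol = "+" then x + h
  else if symbol = "*" then x * h
  else if symbol = "^" then PySem.Int.bxor x h
  else XOR_B x h

def erford4_alt (arr : List Int) (symbol : String) : List Int :=
  if symbol = "+" ∨ symbol = "*" ∨ symbol = "^" ∨ symbol = "XOR" then
    match arr with
    | [] => []                    -- Python: IndexError on arr[0]; excluded by Pre_
    | h :: t => h :: t.map (fun x => opB symbol x h)
  else []                         -- Python: TypeError; excluded by Pre_

-- ===== PRECONDITION & SPEC =====
-- Pre_ excludes exactly the inputs where A does not return: the empty list (IndexError),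
-- symbols other than the four accepted ones (TypeError), and "XOR" with at least two
-- elements one of which is negative (A's XOR helper loops forever on a negative operand).
def Pre_erford4 (arr : List Int) (symbol : String) : Prop :=
  arr ≠ [] ∧ (symbol = "+" ∨ symbol = "*" ∨ symbol = "^" ∨ symbol = "XOR") ∧
  (symbol = "XOR" → arr.length ≤ 1 ∨ ∀ a ∈ arr, 0 ≤ a)
instance (arr : List Int) (symbol : String) : Decidable (Pre_erford4 arr symbol) := by
  unfold Pre_erford4; infer_instance
def pvWitness_erford4 : List Int × String := ([3, 5, 6], "XOR")

def Spec_erford4 (arr : List Int) (symbol : String) (out : List Int) : Prop := out = erford4_alt arr symbol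
instance (arr : List Int) (symbol : String) (out : List Int) : Decidable (Spec_erford4 arr symbol out) := by unfold Spec_erford4; infer_instance

-- ===== CLAIM (what is proved, stated in full; the proofs are below) =====
def Claim_equal_erford4 : Prop := ∀ (arr : List Int) (symbol : String), Dom_erford4 arr symbol → Pre_erford4 arr symbol → Spec_erford4 arr symbol (erford4 arr symbol)

-- ===== LEMMAS AND PROOFS =====

-- canonical bit-by-bit xor value, the common reference point of both ports
def xval : Nat → Int → Int → Int
  | 0, _, _ => 0
  | f + 1, a, b => (if a % 2 = b % 2 then 0 else 1) + 2 * xval f (a / 2) (b / 2)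

lemma xval_zero (f : Nat) : xval f 0 0 = 0 := by
  induction f with
  | zero => rfl
  | succ f ih => simp [xval, ih]

lemma xorB_eq (f : Nat) : ∀ a b p res : Int, 0 ≤ a → 0 ≤ b →
    xorB f a b p res = res + p * xval f a b := by
  induction f with
  | zero => intro a b p res _ _; simp [xorB, xval]
  | succ f ih =>
    intro a b p res ha hb
    rw [xorB, PySem.Int.floordiv_eq_ediv_of_pos (by norm_num),
        PySem.Int.floordiv_eq_ediv_of_pos (by norm_num),
        PySem.Int.mod_eq_emod_of_pos (by norm_num), PySem.Int.mod_eq_emod_of_pos (by norm_num)]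
    by_cases h0 : a = 0 ∧ b = 0
    · simp [h0.1, h0.2, xval, xval_zero]
    · rw [if_neg h0, ih _ _ _ _ (by omega) (by omega)]
      show _ = res + p * xval (f+1) a b
      rw [xval]
      by_cases hbit : a % 2 = b % 2
      · rw [if_pos hbit, if_neg (by simp [hbit])]; ring
      · rw [if_neg hbit, if_pos hbit]; ring

lemma bitsA_zero (f : Nat) : bitsA f 0 = [] := by cases f <;> simp [bitsA]

-- value of a bit list, least significant first
def bval : List Int → Int
  | [] => 0
  | x :: xs => x + 2 * bval xs

lemma reconA_eq_bval (l : List Int) : ∀ i : Nat, reconA l i = 2 ^ i * bval l := by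
  induction l with
  | nil => intro i; simp [reconA, bval]
  | cons x xs ih => intro i; rw [reconA, bval, ih (i + 1), pow_succ]; ring

lemma bitsA_len (f : Nat) (a : Int) (ha : a ≠ 0) :
    (bitsA (f + 1) a).length = (bitsA f (a / 2)).length + 1 := by
  rw [bitsA, if_neg ha, PySem.Int.floordiv_eq_ediv_of_pos (by norm_num)]
  simp

lemma pad_step (f : Nat) (a : Int) (n : Nat) (hn : 1 ≤ n) :
    padTo (bitsA (f + 1) a) n = (a % 2) :: padTo (bitsA f (a / 2)) (n - 1) := by
  by_cases ha : a = 0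
  · subst ha
    rw [bitsA_zero, show ((0:Int) / 2) = 0 by norm_num, bitsA_zero]
    simp only [padTo, List.nil_append, List.length_nil, Nat.sub_zero]
    rw [show ((0:Int) % 2) = 0 by norm_num, show n = (n - 1) + 1 by omega]
    rfl
  · rw [bitsA, if_neg ha, PySem.Int.floordiv_eq_ediv_of_pos (by norm_num),
        PySem.Int.mod_eq_emod_of_pos (by norm_num)]
    have hlen : n - ((bitsA f (a / 2)).length + 1) = (n - 1) - (bitsA f (a / 2)).length := by
      omega
    simp only [padTo, List.cons_append, List.length_cons, hlen]

lemma A_char (f : Nat) : ∀ a b : Int, 0 ≤ a → 0 ≤ b → a < 2 ^ f → b < 2 ^ f →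
    bval (cmpBits (padTo (bitsA f a) (max (bitsA f a).length (bitsA f b).length))
                  (padTo (bitsA f b) (max (bitsA f a).length (bitsA f b).length)))
      = xval f a b := by
  induction f with
  | zero => intro a b ha hb ha' hb'; simp [bitsA, padTo, cmpBits, bval, xval]
  | succ f ih =>
    intro a b ha hb ha' hb'
    by_cases h0 : a = 0 ∧ b = 0
    · obtain ⟨rfl, rfl⟩ := h0
      simp [bitsA_zero, padTo, cmpBits, bval, xval_zero]
    · have hpow : (2:Int) ^ (f + 1) = 2 * 2 ^ f := by ring
      rw [hpow] at ha' hb'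
      set n := max (bitsA (f+1) a).length (bitsA (f+1) b).length with hn
      have hn1 : 1 ≤ n := by
        rcases not_and_or.mp h0 with h | h
        · have : (bitsA (f+1) a).length ≥ 1 := by
            rw [bitsA, if_neg h]; simp
          omega
        · have : (bitsA (f+1) b).length ≥ 1 := by
            rw [bitsA, if_neg h]; simp
          omega
      have hmax : n - 1 = max (bitsA f (a / 2)).length (bitsA f (b / 2)).length := by
        by_cases haz : a = 0
        · have hbz : b ≠ 0 := fun hb0 => h0 ⟨haz, hb0⟩
          subst haz
          rw [hn, bitsA_zero, show ((0:Int) / 2) = 0 by norm_num, bitsA_zero,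
              bitsA_len f b hbz]
          simp
        · by_cases hbz : b = 0
          · subst hbz
            rw [hn, bitsA_zero, show ((0:Int) / 2) = 0 by norm_num, bitsA_zero,
                bitsA_len f a haz]
            simp
          · rw [hn, bitsA_len f a haz, bitsA_len f b hbz]
            omega
      rw [pad_step f a n hn1, pad_step f b n hn1, hmax, cmpBits, List.zipWith_cons_cons]
      show (if b % 2 = a % 2 then (0:Int) else 1) + 2 * bval (cmpBits _ _) = _
      rw [ih (a / 2) (b / 2) (by omega) (by omega) (by omega) (by omega), xval]
      by_cases hbit : a % 2 = b % 2
      · rw [if_pos hbit.symm, if_pos hbit]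
      · rw [if_neg (fun h => hbit h.symm), if_neg hbit]

lemma XOR_eq (a b : Int) (ha : 0 ≤ a) (hb : 0 ≤ b)
    (ha' : a < 2 ^ 64) (hb' : b < 2 ^ 64) : XOR_A a b = XOR_B a b := by
  rw [XOR_A, XOR_B, xorB_eq 64 a b 1 0 ha hb]
  simp only [reconA_eq_bval, pow_zero, one_mul]
  rw [A_char 64 a b ha hb ha' hb', zero_add]

-- ===== VERDICT (by name: the statement is the Claim_ definition above) =====
theorem erford4_spec : Claim_equal_erford4 := by
  intro arr symbol hdom hpre
  obtain ⟨hne, hsym, hxor⟩ := hpre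
  unfold Spec_erford4
  obtain ⟨a0, rest, rfl⟩ : ∃ a0 rest, arr = a0 :: rest := by
    cases arr with
    | nil => exact absurd rfl hne
    | cons a0 rest => exact ⟨a0, rest, rfl⟩
  rcases hsym with h | h | h | h <;> subst h
  · simp [erford4, erford4_alt, opB]
  · simp [erford4, erford4_alt, opB]
  · simp [erford4, erford4_alt, opB]
  · simp only [erford4, erford4_alt, opB,
      show (("XOR":String) = "+") = False from by simp,
      show (("XOR":String) = "*") = False from by simp,
      show (("XOR":String) = "^") = False from by simp,
      if_false, or_true, if_true]
    congr 1
    cases rest with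
    | nil => rfl
    | cons r rs =>
      rcases hxor rfl with hlen | hpos
      · simp at hlen
      · have hdom' : ∀ x ∈ a0 :: r :: rs, -2147483648 ≤ x ∧ x ≤ 2147483648 := by
          intro x hx
          unfold Dom_erford4 at hdom
          simp only [Bool.and_eq_true, List.all_eq_true, pvDomInt, decide_eq_true_eq] at hdom
          exact hdom.1 x hx
        apply List.map_congr_left
        intro x hx
        have hx0 : 0 ≤ x := hpos x (List.mem_cons_of_mem _ hx)
        have ha0 : 0 ≤ a0 := hpos a0 (List.mem_cons_self)
        have hxd := hdom' x (List.mem_cons_of_mem _ hx)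
        have had := hdom' a0 List.mem_cons_self
        exact XOR_eq x a0 hx0 ha0 (by omega) (by omega)
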